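-- pv_equiv track=rewrite | github.com/diegorodriguezv/pythonchallenge | level_32/level_32.py | bit_str_is_consistent
-- ===== SOURCE A (Python) =====
-- def bit_str_is_consistent(csp, bin_bits_str, constraint):
--     lengths_of_1 = []
--     prev = False
--     current_length = 0
--     for bit in bin_bits_str:
--         if bit == '1':
--             current_length += 1
--         else:
--             if prev:
--                 lengths_of_1.append(current_length)
--                 current_length = 0
--         prev = bit == '1'
--     if current_length > 0:
--         lengths_of_1.append(current_length)
--     return lengths_of_1 == constraint
-- ===== SOURCE B (Python) =====
-- def bit_str_is_consistent(csp, bin_bits_str, constraint):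
--     # Index-based run scanner: jump over each run of '1's and check it against
--     # the next expected constraint entry immediately, with early exit.
--     n = len(bin_bits_str)
--     i = 0
--     k = 0
--     while i < n:
--         if bin_bits_str[i] == '1':
--             j = i
--             while j < n and bin_bits_str[j] == '1':
--                 j += 1
--             if k == len(constraint) or constraint[k] != j - i:
--                 return False
--             k += 1
--             i = j
--         else:
--             i += 1
--     return k == len(constraint)
-- ===== Notes on version B (the rewrite author's own statement) =====
-- stated objective: alternative
-- what changed: Replaces A's prev/current_length flag state machine that builds the full run-length list and compares it at the end with an index-jumping run scanner that checks each run of '1's against the next constraint entry as it is found, returning False early on the first mismatch.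
import Mathlib
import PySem

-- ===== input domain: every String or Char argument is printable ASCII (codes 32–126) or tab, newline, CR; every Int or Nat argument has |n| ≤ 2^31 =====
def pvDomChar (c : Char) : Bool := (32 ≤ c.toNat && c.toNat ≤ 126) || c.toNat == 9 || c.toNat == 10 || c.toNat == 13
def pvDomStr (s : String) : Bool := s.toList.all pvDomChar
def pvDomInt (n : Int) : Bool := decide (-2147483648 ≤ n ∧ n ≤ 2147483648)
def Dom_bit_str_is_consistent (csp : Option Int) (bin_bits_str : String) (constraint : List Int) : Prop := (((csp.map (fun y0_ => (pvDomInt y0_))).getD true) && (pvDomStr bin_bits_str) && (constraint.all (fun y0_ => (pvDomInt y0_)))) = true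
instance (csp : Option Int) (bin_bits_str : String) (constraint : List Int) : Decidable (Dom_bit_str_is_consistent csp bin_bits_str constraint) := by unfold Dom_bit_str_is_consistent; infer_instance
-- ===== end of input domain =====

-- B replaces A's flag state machine (build the whole run-length list, compare at the end)
-- with an index-jumping run scanner that checks each run against the constraint as it goes,
-- with early exit; same cost, different decomposition.

-- ===== PORT A =====
-- one step of A's for-loop; state = (lengths_of_1, prev, current_length)
def pvAStep (st : List Int × Bool × Int) (bit : Char) : List Int × Bool × Int :=
  if bit = '1' then (st.1, true, st.2.2 + 1)
  else if st.2.1 then (st.1 ++ [st.2.2], false, 0) else (st.1, false, st.2.2)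

def bit_str_is_consistent (csp : Option Int) (bin_bits_str : String) (constraint : List Int) : Bool :=
  let st := bin_bits_str.toList.foldl pvAStep ([], false, 0)
  let lens := if st.2.2 > 0 then st.1 ++ [st.2.2] else st.1
  decide (lens = constraint)

-- ===== PORT B =====
-- Source B's outer while over i, as recursion on the remaining characters;
-- the inner while (advance j over the run of '1's) is the takeWhile/dropWhile pair.
def pvAltLoop : List Char → List Int → Bool
  | [], cs => cs.isEmpty
  | c :: t, cs =>
    if c = '1' then
      let r : Int := ((t.takeWhile (fun x => x = '1')).length : Int) + 1  -- j - i
      match cs with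
      | [] => false
      | k :: cs' =>
        if k ≠ r then false
        else pvAltLoop (t.dropWhile (fun x => x = '1')) cs'
    else pvAltLoop t cs
termination_by t _ => t.length
decreasing_by
  · exact Nat.lt_succ_of_le (List.dropWhile_sublist _).length_le
  · exact Nat.lt_succ_self _

def bit_str_is_consistent_alt (csp : Option Int) (bin_bits_str : String) (constraint : List Int) : Bool :=
  pvAltLoop bin_bits_str.toList constraint

-- ===== PRECONDITION & SPEC =====
def Spec_bit_str_is_consistent (csp : Option Int) (bin_bits_str : String) (constraint : List Int) (out : Bool) : Prop := out = bit_str_is_consistent_alt csp bin_bits_str constraint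
instance (csp : Option Int) (bin_bits_str : String) (constraint : List Int) (out : Bool) : Decidable (Spec_bit_str_is_consistent csp bin_bits_str constraint out) := by unfold Spec_bit_str_is_consistent; infer_instance

-- ===== CLAIM (what is proved, stated in full; the proofs are below) =====
def Claim_equal_bit_str_is_consistent : Prop := ∀ (csp : Option Int) (bin_bits_str : String) (constraint : List Int), Dom_bit_str_is_consistent csp bin_bits_str constraint → Spec_bit_str_is_consistent csp bin_bits_str constraint (bit_str_is_consistent csp bin_bits_str constraint)

-- ===== LEMMAS AND PROOFS =====

-- reference semantics: the list of run lengths of '1's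
mutual
def pvRuns : List Char → List Int
  | [] => []
  | c :: t => if c = '1' then pvRunsCont 1 t else pvRuns t

def pvRunsCont (cur : Int) : List Char → List Int
  | [] => [cur]
  | c :: t => if c = '1' then pvRunsCont (cur + 1) t else cur :: pvRuns t
end

def pvFinA (st : List Int × Bool × Int) : List Int :=
  if st.2.2 > 0 then st.1 ++ [st.2.2] else st.1

-- A's fold computes pvRuns
theorem pvA_inv : ∀ (t : List Char),
    (∀ (acc : List Int) (cur : Int), 0 < cur →
      pvFinA (t.foldl pvAStep (acc, true, cur)) = acc ++ pvRunsCont cur t)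
    ∧ (∀ acc : List Int, pvFinA (t.foldl pvAStep (acc, false, 0)) = acc ++ pvRuns t) := by
  intro t
  induction t with
  | nil =>
    refine ⟨fun acc cur hc => ?_, fun acc => ?_⟩
    · simp [pvFinA, pvRunsCont, hc]
    · simp [pvFinA, pvRuns]
  | cons c t ih =>
    refine ⟨fun acc cur hc => ?_, fun acc => ?_⟩
    · by_cases h : c = '1'
      · simp [pvAStep, h, pvRunsCont, ih.1 acc (cur + 1) (by omega)]
      · simp [pvAStep, h, pvRunsCont, ih.2 (acc ++ [cur])]
    · by_cases h : c = '1'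
      · simp [pvAStep, h, pvRuns, ih.1 acc 1 (by omega)]
      · simp [pvAStep, h, pvRuns, ih.2 acc]

-- continuing a run through its remaining '1's
theorem pvRunsCont_split : ∀ (t : List Char) (cur : Int),
    pvRunsCont cur t = (cur + ((t.takeWhile (fun x => x = '1')).length : Int))
      :: pvRuns (t.dropWhile (fun x => x = '1')) := by
  intro t
  induction t with
  | nil => intro cur; simp [pvRunsCont, pvRuns]
  | cons c t ih =>
    intro cur
    by_cases h : c = '1'
    · simp only [h, pvRunsCont, if_true, List.takeWhile, List.dropWhile, decide_true, ih,
        List.length_cons]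
      congr 1
      push_cast
      omega
    · simp [pvRunsCont, pvRuns, List.takeWhile, List.dropWhile, h]

-- B's scanner decides equality with pvRuns
theorem pvAltLoop_eq : ∀ (t : List Char) (cs : List Int),
    pvAltLoop t cs = decide (pvRuns t = cs) := by
  intro t cs
  induction t, cs using pvAltLoop.induct with
  | case1 cs => cases cs <;> simp [pvAltLoop, pvRuns]
  | case2 t => simp [pvAltLoop, pvRuns, pvRunsCont_split]
  | case3 t r k cs' hk =>
    have hk' : k ≠ ((t.takeWhile (fun x => x = '1')).length : Int) + 1 := hk
    simp only [pvAltLoop, ne_eq, hk', not_false_eq_true, if_true,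
      pvRuns, pvRunsCont_split]
    simp
    omega
  | case4 t r k cs' hk ih =>
    have hk' : k = ((t.takeWhile (fun x => x = '1')).length : Int) + 1 := by
      by_contra hc; exact hk hc
    simp only [pvAltLoop, ne_eq, hk', not_true_eq_false, if_false, ih,
      pvRuns, pvRunsCont_split]
    simp
    omega
  | case5 c t cs h ih => simp [pvAltLoop, h, pvRuns, ih]

-- ===== VERDICT (by name: the statement is the Claim_ definition above) =====
theorem bit_str_is_consistent_spec : Claim_equal_bit_str_is_consistent := by
  intro csp s cs _
  show _ = _
  simp only [bit_str_is_consistent, bit_str_is_consistent_alt, pvAltLoop_eq]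
  have h := (pvA_inv s.toList).2 []
  simp only [pvFinA, List.nil_append] at h
  rw [h]
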